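-- pv_equiv track=rewrite | github.com/Iskandarrcode/LeetCode | 1460.py | True_
-- ===== SOURCE A (Python) =====
-- def True_(target, arr):
--     count = 0
--     for i in range(len(arr)):
--         if arr[i] in target:
--             count += 1
--             target.remove(arr[i])
--     if count == len(arr):
--         return True
--     else:
--         return False
-- ===== SOURCE B (Python) =====
-- def True_(target, arr):
--     # Sort both lists, then one merge scan checks arr is a sub-multiset of target.
--     t = sorted(target)
--     a = sorted(arr)
--     i = j = 0
--     while j < len(a):
--         if i == len(t):
--             return False
--         if t[i] < a[j]:
--             i += 1
--         elif t[i] == a[j]: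
--             i += 1
--             j += 1
--         else:
--             return False
--     return True
-- ===== Notes on version B (the rewrite author's own statement) =====
-- stated objective: faster
-- what changed: Replaced the quadratic scan-and-remove loop over a shrinking target list by sort-then-merge: sort both lists once and a single two-pointer merge scan decides whether arr is a sub-multiset of target (A's exact criterion), with no membership scans or removals.
import Mathlib
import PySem

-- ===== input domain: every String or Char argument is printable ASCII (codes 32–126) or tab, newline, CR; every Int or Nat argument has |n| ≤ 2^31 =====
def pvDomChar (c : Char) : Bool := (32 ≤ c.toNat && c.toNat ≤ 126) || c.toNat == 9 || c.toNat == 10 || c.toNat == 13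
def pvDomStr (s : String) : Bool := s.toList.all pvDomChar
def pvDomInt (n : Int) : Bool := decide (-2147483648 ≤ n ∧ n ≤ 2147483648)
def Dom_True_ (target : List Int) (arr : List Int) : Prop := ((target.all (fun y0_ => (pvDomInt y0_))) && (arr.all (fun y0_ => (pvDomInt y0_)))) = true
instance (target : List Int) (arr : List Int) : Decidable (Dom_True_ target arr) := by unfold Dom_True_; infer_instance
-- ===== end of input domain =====

-- B replaces A's quadratic scan-and-remove loop by sort-then-merge (sort both lists, one
-- two-pointer scan); equivalence is about the RETURN value only (Python A mutates target in place, B does not).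

-- ===== PORT A =====
-- one loop step of A: st = (count, target); x = arr[i]
def aStep (st : Int × List Int) (x : Int) : Int × List Int :=
  if x ∈ st.2 then (st.1 + 1, (PySem.List.remove? st.2 x).getD st.2) else st

def True_ (target : List Int) (arr : List Int) : Bool :=
  -- for i in range(len(arr)): … arr[i] …  (i is always in range, so pyGetD is exact here)
  decide (((PySem.List.pyRange 0 arr.length 1).foldl
    (fun st i => aStep st (PySem.List.pyGetD arr i 0)) (0, target)).1 = (arr.length : Int))

-- ===== PORT B =====
-- Source B's while loop: advancing i = dropping t's head, advancing j = dropping a's head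
def mergeSub : List Int → List Int → Bool
  | _, [] => true                -- j == len(a): return True
  | [], _ :: _ => false          -- i == len(t): return False
  | y :: t, x :: a =>
    if y < x then mergeSub t (x :: a)
    else if y = x then mergeSub t a
    else false

def True__alt (target : List Int) (arr : List Int) : Bool :=
  mergeSub (PySem.List.sorted target (fun x => x) false)
           (PySem.List.sorted arr (fun x => x) false)

-- ===== PRECONDITION & SPEC =====
def Spec_True_ (target : List Int) (arr : List Int) (out : Bool) : Prop := out = True__alt target arr
instance (target : List Int) (arr : List Int) (out : Bool) : Decidable (Spec_True_ target arr out) := by unfold Spec_True_; infer_instance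

-- ===== CLAIM (what is proved, stated in full; the proofs are below) =====
def Claim_equal_True_ : Prop := ∀ (target : List Int) (arr : List Int), Dom_True_ target arr → Spec_True_ target arr (True_ target arr)

-- ===== LEMMAS AND PROOFS =====

-- the common specification: arr is a sub-multiset of t
def SubCnt (a t : List Int) : Prop := ∀ x : Int, a.count x ≤ t.count x

-- A's counter never exceeds start + number of steps
lemma aFold_le (arr : List Int) : ∀ (c : Int) (t : List Int),
    (arr.foldl aStep (c, t)).1 ≤ c + arr.length := by
  induction arr with
  | nil => intro c t; simp
  | cons x xs ih =>
    intro c t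
    simp only [List.foldl_cons, aStep]
    split_ifs with h
    · have := ih (c + 1) ((PySem.List.remove? t x).getD t)
      simp only [List.length_cons]; push_cast; omega
    · have := ih c t
      simp only [List.length_cons]; push_cast; omega

-- A's loop succeeds (count reaches len(arr)) iff arr is a sub-multiset of target
lemma aFold_iff (arr : List Int) : ∀ (c : Int) (t : List Int),
    ((arr.foldl aStep (c, t)).1 = c + arr.length) ↔ SubCnt arr t := by
  induction arr with
  | nil => intro c t; simp [SubCnt]
  | cons x xs ih =>
    intro c t
    simp only [List.foldl_cons, aStep]
    by_cases hx : x ∈ t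
    · rw [if_pos hx, PySem.List.remove?_eq_some_erase _ _ hx]
      simp only [Option.getD_some]
      have hrec := ih (c + 1) (t.erase x)
      have hcnt : 0 < t.count x := List.count_pos_iff.mpr hx
      constructor
      · intro h z
        have hs : SubCnt xs (t.erase x) := by
          apply hrec.mp
          simp only [List.length_cons] at h; push_cast at h ⊢; omega
        have := hs z
        by_cases hzx : z = x
        · subst hzx
          rw [List.count_erase_self] at this
          simp only [List.count_cons_self]; omega
        · rw [List.count_erase_of_ne hzx] at this
          rw [List.count_cons_of_ne (Ne.symm hzx)]; omega
      · intro hs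
        have hs' : SubCnt xs (t.erase x) := by
          intro z
          by_cases hzx : z = x
          · subst hzx
            have := hs z; simp only [List.count_cons_self] at this
            rw [List.count_erase_self]; omega
          · have := hs z; rw [List.count_cons_of_ne (Ne.symm hzx)] at this
            rw [List.count_erase_of_ne hzx]; omega
        have := hrec.mpr hs'
        simp only [List.length_cons]; push_cast at this ⊢; omega
    · rw [if_neg hx]
      have hle := aFold_le xs c t
      have hcnt : t.count x = 0 := List.count_eq_zero.mpr hx
      constructor
      · intro h
        simp only [List.length_cons] at h; push_cast at h; omega
      · intro hs
        exfalso
        have := hs x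
        simp only [List.count_cons_self, hcnt] at this
        omega

-- the merge scan decides SubCnt on sorted inputs
lemma mergeSub_iff : ∀ (t a : List Int),
    t.Pairwise (· ≤ ·) → a.Pairwise (· ≤ ·) → (mergeSub t a = true ↔ SubCnt a t) := by
  intro t
  induction t with
  | nil =>
    intro a _ _
    cases a with
    | nil => simp [mergeSub, SubCnt]
    | cons x xs =>
      simp only [mergeSub, SubCnt]
      constructor
      · intro h; cases h
      · intro hs
        have := hs x
        simp only [List.count_cons_self, List.count_nil] at this
        omega
  | cons y t ih =>
    intro a hts has
    have ht' : t.Pairwise (· ≤ ·) := hts.tail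
    cases a with
    | nil => simp [mergeSub, SubCnt]
    | cons x a =>
      have ha' : a.Pairwise (· ≤ ·) := has.tail
      simp only [mergeSub]
      by_cases hlt : y < x
      · rw [if_pos hlt, ih (x :: a) ht' has]
        constructor
        · intro hs z
          have := hs z
          refine le_trans this ?_
          simp only [List.count_cons]
          split_ifs <;> omega
        · intro hs z
          have := hs z
          by_cases hzy : y = z
          · -- y < x ≤ every element of x :: a, so (x :: a).count z = 0 (z = y)
            have hz0 : (x :: a).count z = 0 := by
              apply List.count_eq_zero.mpr
              intro hmem
              rcases List.mem_cons.mp hmem with h | h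
              · omega
              · have := (List.pairwise_cons.mp has).1 z h; omega
            rw [hz0]; omega
          · rw [List.count_cons_of_ne hzy] at this
            exact this
      · rw [if_neg hlt]
        by_cases heq : y = x
        · rw [if_pos heq, ih a ht' ha']
          constructor
          · intro hs z
            have := hs z
            simp only [List.count_cons] at this ⊢
            rw [heq]
            split_ifs <;> omega
          · intro hs z
            have := hs z
            simp only [List.count_cons] at this
            rw [heq] at this
            split_ifs at this <;> omega
        · rw [if_neg heq]
          simp only [Bool.false_eq_true, false_iff]
          intro hs
          -- x < y ≤ every element of y :: t, so (y :: t).count x = 0, but (x :: a).count x ≥ 1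
          have hxy : x < y := by omega
          have hz0 : (y :: t).count x = 0 := by
            apply List.count_eq_zero.mpr
            intro hmem
            rcases List.mem_cons.mp hmem with h | h
            · omega
            · have := (List.pairwise_cons.mp hts).1 x h; omega
          have := hs x
          rw [hz0] at this
          simp only [List.count_cons_self] at this
          omega

-- counts are invariant under sorting
lemma count_sorted (xs : List Int) (z : Int) :
    (PySem.List.sorted xs (fun x => x) false).count z = xs.count z :=
  (PySem.List.sorted_perm xs (fun x => x) false).count_eq z

-- ===== VERDICT (by name: the statement is the Claim_ definition above) =====
theorem True__spec : Claim_equal_True_ := by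
  intro target arr _
  unfold Spec_True_ True_ True__alt
  rw [PySem.List.foldl_pyRange_zero_pyGetD' arr 0 aStep (0, target)]
  have hA := aFold_iff arr 0 target
  have hB := mergeSub_iff (PySem.List.sorted target (fun x => x) false)
      (PySem.List.sorted arr (fun x => x) false)
      (PySem.List.sorted_pairwise target (fun x => x))
      (PySem.List.sorted_pairwise arr (fun x => x))
  have hcnt : SubCnt (PySem.List.sorted arr (fun x => x) false)
      (PySem.List.sorted target (fun x => x) false) ↔ SubCnt arr target := by
    unfold SubCnt
    constructor <;> intro h z <;> have := h z <;>
      simp only [count_sorted] at this ⊢ <;> exact this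
  rw [hcnt] at hB
  by_cases h : SubCnt arr target
  · simp [hB.mpr h, hA.mpr h]
  · have h1 : ¬ ((arr.foldl aStep (0, target)).1 = 0 + (arr.length : Int)) := fun hc => h (hA.mp hc)
    have h2 : mergeSub (PySem.List.sorted target (fun x => x) false)
        (PySem.List.sorted arr (fun x => x) false) = false := by
      cases hm : mergeSub (PySem.List.sorted target (fun x => x) false)
          (PySem.List.sorted arr (fun x => x) false)
      · rfl
      · exact absurd (hB.mp hm) h
    rw [h2]
    simp only [decide_eq_false_iff_not]
    omega
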